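-- pv_equiv track=rewrite | github.com/NahuelAntonioBrito/Parcial-Python | funciones.py | procesar_cadena
-- ===== SOURCE A (Python) =====
-- def es_vocal(car):
--     return car.lower() in "aeiouáéíóúü"
--
-- def es_digito(car):
--     return car in "0123456789"
--
-- def procesar_cadena(cadena):
--     cont_voc = clet = cant_pal = 0
--     hay_digito = False
--     for car in cadena:
--         if car != " " and car != ".":
--             clet += 1
--             if clet == 1 and es_vocal(car):
--                 cont_voc += 1
--             if es_digito(car):
--                 hay_digito = True
--         else:
--             if cont_voc and hay_digito:
--                 cant_pal += 1
--             #reset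
--             cont_voc = clet = 0
--             hay_digito = False
--     return cant_pal
-- ===== SOURCE B (Python) =====
-- def es_vocal(car):
--     return car.lower() in "aeiouáéíóúü"
--
-- def es_digito(car):
--     return car in "0123456789"
--
-- def procesar_cadena(cadena):
--     tokens = cadena.replace(".", " ").split(" ")
--     return sum(1 for w in tokens[:-1]
--                if w and es_vocal(w[0]) and any(es_digito(c) for c in w))
-- ===== Notes on version B (the rewrite author's own statement) =====
-- stated objective: simpler
-- what changed: Replaced A's single-pass character state machine (cont_voc/clet/hay_digito flags with manual resets) by a tokenize-then-filter decomposition: substitute dots by spaces, split on spaces, and count the tokens before the last one whose first character is a vowel and which contain a digit; the C-level str.replace/str.split makes B measurably faster as well.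
import Mathlib
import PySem

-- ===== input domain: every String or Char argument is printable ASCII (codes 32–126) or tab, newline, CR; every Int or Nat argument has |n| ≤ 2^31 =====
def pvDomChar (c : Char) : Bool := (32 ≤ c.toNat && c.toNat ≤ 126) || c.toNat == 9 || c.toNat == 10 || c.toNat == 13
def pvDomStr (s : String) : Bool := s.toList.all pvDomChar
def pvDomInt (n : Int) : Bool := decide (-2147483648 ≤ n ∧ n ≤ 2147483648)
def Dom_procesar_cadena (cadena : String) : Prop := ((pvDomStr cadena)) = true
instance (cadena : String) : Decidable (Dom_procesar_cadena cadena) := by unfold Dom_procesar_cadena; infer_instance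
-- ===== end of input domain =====

-- B replaces A's char-by-char state machine with a tokenize-then-filter decomposition
-- (substitute dots by spaces, split on spaces, count qualifying tokens before the last):
-- simpler, and measurably faster via C-level str.replace/str.split; same return value.

-- ===== PORT A =====
-- shared helpers (both Python versions call the same module helpers)
def es_vocal (car : Char) : Bool :=
  PySem.Chars.isIn (PySem.Chars.lower [car]) "aeiouáéíóúü".toList

def es_digito (car : Char) : Bool :=
  PySem.Chars.isIn [car] "0123456789".toList

-- one loop iteration of A: state (cont_voc, clet, hay_digito, cant_pal)
def pasoA (st : Int × Int × Bool × Int) (car : Char) : Int × Int × Bool × Int :=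
  let cv := st.1
  let cl := st.2.1
  let hd := st.2.2.1
  let cp := st.2.2.2
  if car ≠ ' ' && car ≠ '.' then
    let cl' := cl + 1
    let cv' := if cl' == 1 && es_vocal car then cv + 1 else cv
    let hd' := if es_digito car then true else hd
    (cv', cl', hd', cp)
  else
    (0, 0, false, if cv != 0 && hd then cp + 1 else cp)

def procesar_cadena (cadena : String) : Int :=
  (cadena.toList.foldl pasoA (0, 0, false, 0)).2.2.2

-- ===== PORT B =====
-- Source B: w and es_vocal(w[0]) and any(es_digito(c) for c in w)
def wordOK (w : List Char) : Bool :=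
  match w with
  | [] => false
  | c :: _ => es_vocal c && w.any es_digito

def procesar_cadena_alt (cadena : String) : Int :=
  let tokens := PySem.Chars.splitOn (PySem.Chars.replace cadena.toList ['.'] [' ']) [' ']
  ((PySem.List.slice tokens none (some (-1))).countP (fun w => wordOK w) : Int)

-- ===== PRECONDITION & SPEC =====
def Spec_procesar_cadena (cadena : String) (out : Int) : Prop := out = procesar_cadena_alt cadena
instance (cadena : String) (out : Int) : Decidable (Spec_procesar_cadena cadena out) := by unfold Spec_procesar_cadena; infer_instance

-- ===== CLAIM (what is proved, stated in full; the proofs are below) =====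
def Claim_equal_procesar_cadena : Prop := ∀ (cadena : String), Dom_procesar_cadena cadena → Spec_procesar_cadena cadena (procesar_cadena cadena)

-- ===== LEMMAS AND PROOFS =====

-- char substitution performed by replace(".", " ")
def subDot (c : Char) : Char := if c = '.' then ' ' else c

-- structural split on ' '
def splitCh : List Char → List (List Char)
  | [] => [[]]
  | c :: rest => if c = ' ' then [] :: splitCh rest else (splitCh rest).modifyHead (c :: ·)

lemma splitCh_ne_nil (l : List Char) : splitCh l ≠ [] := by
  cases l with
  | nil => simp [splitCh]
  | cons c rest =>
    simp only [splitCh]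
    split
    · simp
    · cases h : splitCh rest with
      | nil => exact absurd h (splitCh_ne_nil rest)
      | cons w ws => simp [List.modifyHead]

lemma replace_go_eq (l acc : List Char) (fuel : Nat) (h : l.length ≤ fuel) :
    PySem.Chars.replace.go ['.'] [' '] fuel l acc = acc.reverse ++ l.map subDot := by
  induction fuel generalizing l acc with
  | zero =>
    have : l = [] := List.eq_nil_of_length_eq_zero (Nat.le_zero.mp h)
    subst this; simp [PySem.Chars.replace.go]
  | succ n ih =>
    cases l with
    | nil => simp [PySem.Chars.replace.go]
    | cons c rest =>
      simp only [PySem.Chars.replace.go, List.isPrefixOf]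
      by_cases hc : c = '.'
      · subst hc
        simp only [beq_self_eq_true, Bool.and_self, if_pos]
        rw [ih _ _ (by simpa using Nat.le_of_succ_le_succ h)]
        simp [subDot]
      · have hb : (('.' == c) && true) = false := by
          simp only [Bool.and_true, beq_eq_false_iff_ne, ne_eq]
          exact fun h' => hc h'.symm
        simp only [hb, Bool.false_eq_true, if_false]
        rw [ih _ _ (by simpa using Nat.le_of_succ_le_succ h)]
        simp [subDot, hc]

lemma replace_eq (l : List Char) :
    PySem.Chars.replace l ['.'] [' '] = l.map subDot := by
  simp only [PySem.Chars.replace, List.isEmpty]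
  rw [replace_go_eq l [] l.length (le_refl _)]
  simp

lemma splitOn_go_eq (l cur : List Char) (acc : List (List Char)) (fuel : Nat)
    (h : l.length ≤ fuel) :
    PySem.Chars.splitOn.go [' '] fuel l cur acc =
      acc.reverse ++ (splitCh l).modifyHead (cur.reverse ++ ·) := by
  induction fuel generalizing l cur acc with
  | zero =>
    have : l = [] := List.eq_nil_of_length_eq_zero (Nat.le_zero.mp h)
    subst this; simp [PySem.Chars.splitOn.go, splitCh, List.modifyHead]
  | succ n ih =>
    cases l with
    | nil => simp [PySem.Chars.splitOn.go, splitCh, List.modifyHead]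
    | cons c rest =>
      simp only [PySem.Chars.splitOn.go, List.isPrefixOf]
      by_cases hc : c = ' '
      · subst hc
        simp only [beq_self_eq_true, Bool.and_self, if_pos]
        rw [ih _ _ _ (by simpa using Nat.le_of_succ_le_succ h)]
        simp only [splitCh, List.modifyHead, List.reverse_cons, List.append_assoc]
        cases hr : splitCh rest with
        | nil => exact absurd hr (splitCh_ne_nil rest)
        | cons w ws => simp [hr]
      · have hb : ((' ' == c) && true) = false := by
          simp only [Bool.and_true, beq_eq_false_iff_ne, ne_eq]
          exact fun h' => hc h'.symm
        simp only [hb, Bool.false_eq_true, if_false]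
        rw [ih _ _ _ (by simpa using Nat.le_of_succ_le_succ h)]
        have hne := splitCh_ne_nil rest
        cases hr : splitCh rest with
        | nil => exact absurd hr hne
        | cons w ws => simp [splitCh, hc, hr, List.modifyHead]

lemma splitOn_eq (l : List Char) :
    PySem.Chars.splitOn l [' '] = splitCh l := by
  rw [PySem.Chars.splitOn, splitOn_go_eq l [] [] (l.length + 1) (Nat.le_succ _)]
  cases h : splitCh l with
  | nil => exact absurd h (splitCh_ne_nil l)
  | cons w ws => simp [List.modifyHead]

-- is the first character a vowel (false on the empty word)
def wordVowel (w : List Char) : Bool :=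
  match w with
  | [] => false
  | c :: _ => es_vocal c

lemma wordOK_eq (w : List Char) : wordOK w = (wordVowel w && w.any es_digito) := by
  cases w <;> simp [wordOK, wordVowel]

-- counting function mirroring A's flags: v = "first char of current word is a vowel",
-- started = "current word nonempty", hd = "current word has a digit"
def countAux : List Char → Bool → Bool → Bool → Nat
  | [], _, _, _ => 0
  | c :: rest, v, started, hd =>
    if c = ' ' ∨ c = '.' then
      (if v && hd then 1 else 0) + countAux rest false false false
    else
      countAux rest (if started then v else es_vocal c) true (hd || es_digito c)

lemma foldA_eq (l : List Char) : ∀ (cv cl : Int) (hd : Bool) (cp : Int),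
    0 ≤ cl → (cl = 0 → cv = 0) →
    (l.foldl pasoA (cv, cl, hd, cp)).2.2.2 = cp + countAux l (cv != 0) (cl != 0) hd := by
  induction l with
  | nil => intro cv cl hd cp _ _; simp [countAux]
  | cons c rest ih =>
    intro cv cl hd cp hcl hcv
    by_cases hsep : c = ' ' ∨ c = '.'
    · have hcond : (c ≠ ' ' && c ≠ '.') = false := by
        rcases hsep with h | h <;> simp [h]
      simp only [List.foldl_cons, pasoA, hcond, Bool.false_eq_true, if_false]
      rw [ih 0 0 false _ (le_refl 0) (fun _ => rfl)]
      simp only [countAux, hsep, if_pos]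
      split_ifs <;> simp_all
      omega
    · rw [not_or] at hsep
      have hcond : (c ≠ ' ' && c ≠ '.') = true := by simp [hsep.1, hsep.2]
      simp only [List.foldl_cons, pasoA, hcond, if_pos]
      have harg : ((if (cl + 1 == 1 && es_vocal c) = true then cv + 1 else cv) != 0)
          = (if (cl != 0) = true then (cv != 0) else es_vocal c) := by
        by_cases h0 : cl = 0
        · subst h0
          have := hcv rfl; subst this
          by_cases hv : es_vocal c = true <;> simp [hv]
        · have h1 : (cl + 1 == 1) = false := by simp; omega
          simp [h1, h0]
      rw [ih _ (cl + 1) _ cp (by omega) (by omega)]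
      have hcl1 : ((cl + 1) != 0) = true := by simp; omega
      have hhd : (if es_digito c = true then true else hd) = (hd || es_digito c) := by
        by_cases h : es_digito c = true <;> simp [h]
      have hns : ¬(c = ' ' ∨ c = '.') := not_or.mpr hsep
      simp only [countAux, hns, if_false, harg, hcl1, hhd]

lemma splitCh_append_word (p l : List Char) (hp : ∀ c ∈ p, c ≠ ' ') :
    splitCh (p ++ l) = (splitCh l).modifyHead (p ++ ·) := by
  induction p with
  | nil =>
    cases h : splitCh l with
    | nil => exact absurd h (splitCh_ne_nil l)
    | cons w ws => simp [h]
  | cons c q ih =>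
    have hc : c ≠ ' ' := hp c (by simp)
    simp only [List.cons_append, splitCh, hc, ih (fun x hx => hp x (by simp [hx]))]
    cases h : splitCh l with
    | nil => exact absurd h (splitCh_ne_nil l)
    | cons w ws => simp [List.modifyHead]

lemma map_subDot_id (q : List Char) (hq : ∀ c ∈ q, c ≠ '.') : q.map subDot = q := by
  induction q with
  | nil => rfl
  | cons c t ih =>
    simp [subDot, hq c (by simp), ih (fun x hx => hq x (by simp [hx]))]

lemma countAux_split (l : List Char) : ∀ (p : List Char),
    (∀ c ∈ p, c ≠ ' ' ∧ c ≠ '.') →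
    countAux l (wordVowel p) (!p.isEmpty) (p.any es_digito)
      = ((splitCh ((p ++ l).map subDot)).dropLast).countP (fun w => wordOK w) := by
  induction l with
  | nil =>
    intro p hp
    rw [List.append_nil, map_subDot_id p (fun c hc => (hp c hc).2)]
    have hs : splitCh p = [p] := by
      have h := splitCh_append_word p [] (fun c hc => (hp c hc).1)
      simpa [splitCh, List.modifyHead] using h
    simp [hs, countAux]
  | cons c rest ih =>
    intro p hp
    by_cases hsep : c = ' ' ∨ c = '.'
    · have hsub : subDot c = ' ' := by rcases hsep with h | h <;> simp [subDot, h]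
      have hmapp : (p ++ c :: rest).map subDot = p ++ ' ' :: rest.map subDot := by
        simp [map_subDot_id p (fun x hx => (hp x hx).2), hsub]
      rw [hmapp, splitCh_append_word p _ (fun x hx => (hp x hx).1)]
      have hstep : splitCh (' ' :: rest.map subDot) = [] :: splitCh (rest.map subDot) := by
        simp [splitCh]
      rw [hstep]
      simp only [List.modifyHead, List.append_nil]
      rw [List.dropLast_cons_of_ne_nil (splitCh_ne_nil _)]
      rw [List.countP_cons]
      have hIH := ih [] (by simp)
      simp only [wordVowel, List.isEmpty_nil, Bool.not_true, List.any_nil, List.nil_append] at hIH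
      simp only [countAux, hsep, if_pos, hIH, wordOK_eq]
      omega
    · rw [not_or] at hsep
      have hIH := ih (p ++ [c]) (by
        intro x hx
        rcases List.mem_append.mp hx with h | h
        · exact hp x h
        · simp only [List.mem_singleton] at h; subst h; exact hsep)
      have e1 : wordVowel (p ++ [c]) = (if (!p.isEmpty) = true then wordVowel p else es_vocal c) := by
        cases p <;> simp [wordVowel]
      have e2 : (!(p ++ [c]).isEmpty) = true := by simp
      have e3 : (p ++ [c]).any es_digito = (p.any es_digito || es_digito c) := by
        simp [List.any_append]
      rw [e1, e2, e3, List.append_assoc] at hIH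
      have hns : ¬(c = ' ' ∨ c = '.') := not_or.mpr hsep
      simp only [countAux, hns, if_false]
      simpa using hIH

-- ===== VERDICT (by name: the statement is the Claim_ definition above) =====
theorem procesar_cadena_spec : Claim_equal_procesar_cadena := by
  intro cadena _
  unfold Spec_procesar_cadena procesar_cadena procesar_cadena_alt
  rw [replace_eq, splitOn_eq]
  rw [foldA_eq cadena.toList 0 0 false 0 (le_refl 0) (fun _ => rfl)]
  have h := countAux_split cadena.toList [] (by simp)
  simp only [wordVowel, List.isEmpty_nil, Bool.not_true, List.any_nil, List.nil_append] at h
  simp [pysem, h]
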